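-- pv_equiv track=rewrite | github.com/mrogo22/PRISM | src/pysubgroup extensions/array_target.py | is_positive_then_zero
-- ===== SOURCE A (Python) =====
-- def is_positive_then_zero(array):
--     """
--     Checks if the array starts with n positive numbers followed by m zeroes (n > 0, m > 0).
--     The array must start with at least one positive number and transition to zeroes without returning to positive or encountering negative values.
--     """
--     seen_zero = False  # Tracks if we have encountered zeroes
--     for value in array:
--         if value > 0:
--             if seen_zero:
--                 return False  # Encountered a positive number after zeroes
--         elif value == 0:
--             seen_zero = True  # Start tracking zeroes
--         else:
--             return False  # Negative values are not allowed
--     # Ensure the array has at least one positive number and one zero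
--     return seen_zero and array[0] > 0
-- ===== SOURCE B (Python) =====
-- def is_positive_then_zero(array):
--     """Boundary-scan re-implementation: find the end of the leading positive
--     run, then verify a nonempty all-zero suffix."""
--     n = len(array)
--     k = 0
--     while k < n and array[k] > 0:
--         k += 1
--     if k == 0 or k == n:
--         return False
--     return all(v == 0 for v in array[k:])
-- ===== Notes on version B (the rewrite author's own statement) =====
-- stated objective: alternative
-- what changed: Replaces the flag-driven single state machine (seen_zero flag with early returns and a final array[0] check) by two differently-shaped passes: an index scan over the leading positive run to a boundary k, then a homogeneous all-zero check of the suffix.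
import Mathlib
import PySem

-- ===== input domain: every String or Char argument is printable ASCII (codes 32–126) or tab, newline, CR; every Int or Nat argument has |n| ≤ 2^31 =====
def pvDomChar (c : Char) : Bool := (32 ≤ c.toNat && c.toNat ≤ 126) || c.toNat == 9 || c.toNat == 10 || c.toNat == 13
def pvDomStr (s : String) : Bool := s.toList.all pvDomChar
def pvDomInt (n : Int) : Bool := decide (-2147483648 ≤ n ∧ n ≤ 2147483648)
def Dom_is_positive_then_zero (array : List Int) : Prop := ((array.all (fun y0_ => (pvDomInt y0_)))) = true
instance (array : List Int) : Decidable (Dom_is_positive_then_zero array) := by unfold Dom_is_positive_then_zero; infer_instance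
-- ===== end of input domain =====

-- B replaces A's flag-driven state machine with a boundary scan over the leading
-- positive run followed by an all-zero suffix check (alternative decomposition, same cost).


-- ===== PORT A =====
-- A's loop over `array` with the `seen_zero` flag; early `return False` is a
-- `false` leaf, the final `seen_zero and array[0] > 0` keeps Python's
-- short-circuit (array[0] via pyGet?, only evaluated when seen_zero is true).
def pvLoopA (array : List Int) (seen_zero : Bool) : List Int → Bool
  | [] => seen_zero && ((PySem.List.pyGet? array 0).elim false (fun v => decide (0 < v)))
  | value :: rest =>
      if 0 < value then
        (if seen_zero then false else pvLoopA array seen_zero rest)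
      else if value = 0 then pvLoopA array true rest
      else false

def is_positive_then_zero (array : List Int) : Bool :=
  pvLoopA array false array

-- ===== PORT B =====
-- Source B's while loop `while k < n and array[k] > 0: k += 1` as the structural
-- scan of the leading positive run, returning the boundary length k.
def pvPosRun : List Int → Nat
  | [] => 0
  | x :: xs => if 0 < x then pvPosRun xs + 1 else 0

def is_positive_then_zero_alt (array : List Int) : Bool :=
  let k := pvPosRun array
  if k = 0 || k = array.length then false
  else (array.drop k).all (fun v => v == 0)

-- ===== PRECONDITION & SPEC =====
def Spec_is_positive_then_zero (array : List Int) (out : Bool) : Prop := out = is_positive_then_zero_alt array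
instance (array : List Int) (out : Bool) : Decidable (Spec_is_positive_then_zero array out) := by unfold Spec_is_positive_then_zero; infer_instance

-- ===== CLAIM (what is proved, stated in full; the proofs are below) =====
def Claim_equal_is_positive_then_zero : Prop := ∀ (array : List Int), Dom_is_positive_then_zero array → Spec_is_positive_then_zero array (is_positive_then_zero array)

-- ===== LEMMAS AND PROOFS =====

theorem pvPosRun_le (xs : List Int) : pvPosRun xs ≤ xs.length := by
  induction xs with
  | nil => simp [pvPosRun]
  | cons y ys ih =>
    by_cases hy : 0 < y
    · simpa [pvPosRun, hy] using ih
    · simp [pvPosRun, hy]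

-- If the final `array[0] > 0` test is false, A's seen_zero branch can never accept.
theorem pvLoopA_seen_dead (arr : List Int)
    (h : ((PySem.List.pyGet? arr 0).elim false (fun v => decide (0 < v))) = false) :
    ∀ xs : List Int, pvLoopA arr true xs = false := by
  intro xs
  induction xs with
  | nil => simp [pvLoopA, h]
  | cons y ys ih =>
    by_cases hy : 0 < y
    · simp [pvLoopA, hy]
    · by_cases hy0 : y = 0
      · simp [pvLoopA, hy0, ih]
      · simp [pvLoopA, hy, hy0]

-- After seen_zero is set, A's loop accepts iff the rest is all zeros,
-- and the head of the full array (x) is positive.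
theorem pvLoopA_seen (x : Int) (t : List Int) (hx : 0 < x) :
    ∀ xs : List Int, pvLoopA (x :: t) true xs = xs.all (fun v => v == 0) := by
  intro xs
  induction xs with
  | nil => simp [pvLoopA, PySem.List.pyGet?, PySem.List.pyIdx?, hx]
  | cons y ys ih =>
    by_cases hy : 0 < y
    · have hne : ¬ (y = 0) := by omega
      simp [pvLoopA, hy, hne, List.all_cons]
    · by_cases hy0 : y = 0
      · subst hy0
        simp [pvLoopA, ih, List.all_cons]
      · simp [pvLoopA, hy, hy0, List.all_cons]

-- Before any zero is seen, A's loop on the tail equals B's test of the tail: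
-- the positive run must stop strictly inside, and the suffix be all zeros.
theorem pvLoopA_unseen (x : Int) (t : List Int) (hx : 0 < x) :
    ∀ xs : List Int,
      pvLoopA (x :: t) false xs
        = (decide (pvPosRun xs < xs.length) && (xs.drop (pvPosRun xs)).all (fun v => v == 0)) := by
  intro xs
  induction xs with
  | nil => simp [pvLoopA, pvPosRun]
  | cons y ys ih =>
    by_cases hy : 0 < y
    · simp only [pvLoopA, if_pos hy, ih, pvPosRun]
      simp only [List.length_cons, Nat.add_lt_add_iff_right, List.drop_succ_cons]
      simp
    · by_cases hy0 : y = 0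
      · subst hy0
        rw [pvLoopA]
        simp only [if_neg hy]
        rw [pvLoopA_seen x t hx ys]
        have hr : pvPosRun ((0:Int) :: ys) = 0 := by simp [pvPosRun]
        simp [hr, List.all_cons]
      · rw [pvLoopA]
        simp only [if_neg hy, if_neg hy0]
        have hr : pvPosRun (y :: ys) = 0 := by simp [pvPosRun, hy]
        simp [hr, List.all_cons, hy0]

-- ===== VERDICT (by name: the statement is the Claim_ definition above) =====
theorem is_positive_then_zero_spec : Claim_equal_is_positive_then_zero := by
  intro array _
  unfold Spec_is_positive_then_zero is_positive_then_zero is_positive_then_zero_alt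
  cases array with
  | nil => simp [pvLoopA, pvPosRun]
  | cons x xs =>
    by_cases hx : 0 < x
    · rw [pvLoopA]
      simp only [if_pos hx, if_neg (Bool.false_ne_true ∘ id)]
      rw [pvLoopA_unseen x xs hx xs]
      have hr : pvPosRun (x :: xs) = pvPosRun xs + 1 := by simp [pvPosRun, hx]
      have hlen : (pvPosRun xs + 1 = (x :: xs).length) ↔ (pvPosRun xs = xs.length) := by
        simp
      have hle : pvPosRun xs ≤ xs.length := pvPosRun_le xs
      by_cases hstop : pvPosRun xs = xs.length
      · simp [hr, hstop]
      · have hlt : pvPosRun xs < xs.length := by omega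
        simp [hr, hlt, hstop, List.drop_succ_cons]
    · by_cases hx0 : x = 0
      · subst hx0
        rw [pvLoopA]
        simp only [if_neg hx]
        rw [pvLoopA_seen_dead ((0:Int) :: xs) (by simp [PySem.List.pyGet?, PySem.List.pyIdx?]) xs]
        have hr : pvPosRun ((0:Int) :: xs) = 0 := by simp [pvPosRun]
        simp [hr]
      · rw [pvLoopA]
        simp only [if_neg hx, if_neg hx0]
        have hr : pvPosRun (x :: xs) = 0 := by simp [pvPosRun, hx]
        simp [hr]
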